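-- pv_equiv track=rewrite | github.com/sertman1/IR-WA-HW3 | k_nearest_classifier.py | get_stepped_weights
-- ===== SOURCE A (Python) =====
-- def get_uniform_weights(sentence):
--     weightings = [1] * len(sentence)
--     return weightings
--
-- def get_stepped_weights(sentence):
--     weightings = []
--     pos_ambigious = get_index_of_ambigious_word(sentence)
--
--     if pos_ambigious == -1:
--         return get_uniform_weights(sentence)
--
--     i = 0
--     while i < len(sentence):
--         dist = abs(pos_ambigious - i)
--         if dist == 0:
--             weightings.append(0)
--         elif dist == 1: # adjacent
--             weightings.append(6)
--         elif dist == 2 or dist == 3: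
--             weightings.append(3)
--         else:
--             weightings.append(1)
--
--         i += 1
--
--     return weightings
--
-- def get_index_of_ambigious_word(sentence):
--     i = 0
--     for word in sentence:
--         if len(word) > 3 and word[0] == "." and word [1] == "X" and word[2] == "-":
--             return i
--         i += 1
--     return -1
-- ===== SOURCE B (Python) =====
-- def get_stepped_weights(sentence):
--     n = len(sentence)
--     weightings = [1] * n
--     pos = -1
--     for i, word in enumerate(sentence):
--         if word.startswith(".X-") and len(word) > 3:
--             pos = i
--             break
--     if pos == -1:
--         return weightings
--     weightings[pos] = 0
--     for off, val in ((-3, 3), (-2, 3), (-1, 6), (1, 6), (2, 3), (3, 3)):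
--         j = pos + off
--         if 0 <= j < n:
--             weightings[j] = val
--     return weightings
-- ===== Notes on version B (the rewrite author's own statement) =====
-- stated objective: simpler
-- what changed: B initializes the whole list to 1 and patches only the fixed seven-cell neighborhood of the ambiguous word with guarded writes, instead of A's per-position distance computation and branch chain over the entire sentence.
import Mathlib
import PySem

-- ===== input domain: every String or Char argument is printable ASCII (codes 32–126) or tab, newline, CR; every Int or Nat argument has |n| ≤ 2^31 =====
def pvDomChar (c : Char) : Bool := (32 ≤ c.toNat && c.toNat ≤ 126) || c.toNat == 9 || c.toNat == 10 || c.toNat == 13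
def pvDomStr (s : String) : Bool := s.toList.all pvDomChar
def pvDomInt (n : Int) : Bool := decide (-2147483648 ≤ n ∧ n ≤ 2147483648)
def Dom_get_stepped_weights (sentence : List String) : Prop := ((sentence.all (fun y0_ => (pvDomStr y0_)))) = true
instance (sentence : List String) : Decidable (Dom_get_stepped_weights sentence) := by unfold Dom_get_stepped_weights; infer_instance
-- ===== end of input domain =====

-- B initializes [1]*n and patches the fixed ±3 neighborhood of the ambiguous word with guarded writes, instead of A's per-position distance/branch scan (objective: simpler).


-- ===== PORT A =====
def get_uniform_weights (sentence : List String) : List Int :=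
  List.replicate sentence.length 1

-- the 'for word in sentence' loop of get_index_of_ambigious_word, with the counter i
def pvAmbGoA : List String → Int → Int
  | [], _ => -1
  | w :: rest, i =>
      if PySem.Str.len w > 3 ∧ PySem.Str.pyGet? w 0 = some '.' ∧
         PySem.Str.pyGet? w 1 = some 'X' ∧ PySem.Str.pyGet? w 2 = some '-' then i
      else pvAmbGoA rest (i + 1)

def get_index_of_ambigious_word (sentence : List String) : Int :=
  pvAmbGoA sentence 0

def get_stepped_weights (sentence : List String) : List Int :=
  let pos_ambigious := get_index_of_ambigious_word sentence
  if pos_ambigious = -1 then get_uniform_weights sentence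
  else
    -- while i < len(sentence): i += 1  ≡ iterate i over range(len(sentence))
    (PySem.List.pyRange 0 sentence.length 1).foldl
      (fun weightings i =>
        let dist := (pos_ambigious - i).natAbs
        if dist = 0 then weightings ++ [(0 : Int)]
        else if dist = 1 then weightings ++ [6]
        else if dist = 2 ∨ dist = 3 then weightings ++ [3]
        else weightings ++ [1]) []

-- ===== PORT B =====
-- B's search loop: first index whose word starts with ".X-" and has length > 3, else -1
def pvFindAmbB : List String → Int → Int
  | [], _ => -1
  | w :: rest, i =>
      if PySem.Str.startswith w ".X-" && decide (PySem.Str.len w > 3) then i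
      else pvFindAmbB rest (i + 1)

def get_stepped_weights_alt (sentence : List String) : List Int :=
  let n : Int := sentence.length
  let weightings := List.replicate sentence.length (1 : Int)
  let pos := pvFindAmbB sentence 0
  if pos = -1 then weightings
  else
    ([(-3, 3), (-2, 3), (-1, 6), (1, 6), (2, 3), (3, 3)] : List (Int × Int)).foldl
      (fun acc p =>
        let j := pos + p.1
        if 0 ≤ j ∧ j < n then PySem.List.pySetD acc j p.2 else acc)
      (PySem.List.pySetD weightings pos 0)

-- ===== PRECONDITION & SPEC =====
def Spec_get_stepped_weights (sentence : List String) (out : List Int) : Prop := out = get_stepped_weights_alt sentence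
instance (sentence : List String) (out : List Int) : Decidable (Spec_get_stepped_weights sentence out) := by unfold Spec_get_stepped_weights; infer_instance

-- ===== CLAIM (what is proved, stated in full; the proofs are below) =====
def Claim_equal_get_stepped_weights : Prop := ∀ (sentence : List String), Dom_get_stepped_weights sentence → Spec_get_stepped_weights sentence (get_stepped_weights sentence)

-- ===== LEMMAS AND PROOFS =====

-- A's word test and B's word test agree
theorem pvAmb_cond_eq (w : String) :
    (PySem.Str.startswith w ".X-" && decide (PySem.Str.len w > 3)) = true ↔
    (PySem.Str.len w > 3 ∧ PySem.Str.pyGet? w 0 = some '.' ∧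
     PySem.Str.pyGet? w 1 = some 'X' ∧ PySem.Str.pyGet? w 2 = some '-') := by
  have hlen : PySem.Str.len w = (w.toList.length : Int) := by simp
  have hg : ∀ i : Int, PySem.Str.pyGet? w i = PySem.List.pyGet? w.toList i := fun i => by simp
  rw [Bool.and_eq_true, decide_eq_true_eq, PySem.Str.startswith_eq, PySem.Chars.startswith_iff,
    show (".X-" : String).toList = ['.','X','-'] by decide, hlen, hg 0, hg 1, hg 2]
  generalize w.toList = l
  match l with
  | [] => simp
  | [a] => simp [PySem.List.pyGet?, PySem.List.pyIdx?]
  | [a, b] => simp [PySem.List.pyGet?, PySem.List.pyIdx?]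
  | [a, b, c] => simp [PySem.List.pyGet?, PySem.List.pyIdx?]
  | a :: b :: c :: d :: t =>
    have h0 : (0:Int) ≤ (t.length:Int) + 1 + 1 + 1 := by omega
    have h1 : (1:Int) ≤ (t.length:Int) + 1 + 1 + 1 := by omega
    have h2 : (2:Int) ≤ (t.length:Int) + 1 + 1 + 1 := by omega
    have h3 : (3:Int) ≤ (t.length:Int) + 1 + 1 + 1 := by omega
    have h4 : (0:Int) ≤ (t.length:Int) + 1 + 1 := by omega
    have h5 : (0:Int) ≤ (t.length:Int) + 1 := by omega
    simp [PySem.List.pyGet?, PySem.List.pyIdx?, List.cons_prefix_cons, h0, h2, h3, h4, eq_comm]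

theorem pvAmb_eq (ws : List String) (i : Int) : pvAmbGoA ws i = pvFindAmbB ws i := by
  induction ws generalizing i with
  | nil => rfl
  | cons w rest ih =>
    simp only [pvAmbGoA, pvFindAmbB]
    by_cases h : (PySem.Str.startswith w ".X-" && decide (PySem.Str.len w > 3)) = true
    · rw [if_pos ((pvAmb_cond_eq w).mp h), if_pos h]
    · rw [if_neg (fun hc => h ((pvAmb_cond_eq w).mpr hc)), if_neg (by simpa using h), ih]

-- the found index is in range unless it is -1
theorem pvAmb_range (ws : List String) (i : Int) :
    pvAmbGoA ws i = -1 ∨ (i ≤ pvAmbGoA ws i ∧ pvAmbGoA ws i < i + ws.length) := by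
  induction ws generalizing i with
  | nil => left; rfl
  | cons w rest ih =>
    simp only [pvAmbGoA]
    split
    · right; constructor <;> simp
    · rcases ih (i + 1) with h | ⟨h1, h2⟩
      · left; exact h
      · right; simp only [List.length_cons]; push_cast; omega

def pvStepVal (pos i : Int) : Int :=
  if (pos - i).natAbs = 0 then 0
  else if (pos - i).natAbs = 1 then 6
  else if (pos - i).natAbs = 2 ∨ (pos - i).natAbs = 3 then 3
  else 1

theorem pvA_map (sentence : List String) (pos : Int) (hpos : get_index_of_ambigious_word sentence = pos)
    (hne : pos ≠ -1) :
    get_stepped_weights sentence = (List.range sentence.length).map (fun k : Nat => pvStepVal pos (k : Int)) := by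
  unfold get_stepped_weights
  rw [hpos, if_neg hne]
  have hb : (fun (weightings : List Int) (i : Int) =>
      let dist := (pos - i).natAbs
      if dist = 0 then weightings ++ [(0 : Int)]
      else if dist = 1 then weightings ++ [6]
      else if dist = 2 ∨ dist = 3 then weightings ++ [3]
      else weightings ++ [1]) =
      (fun weightings i => weightings ++ [pvStepVal pos i]) := by
    funext acc i
    simp only [pvStepVal]
    split_ifs <;> rfl
  rw [hb, PySem.List.foldl_append_singleton_eq_map, PySem.List.pyRange_zero_natCast,
    List.map_map]
  rfl

def pvT (pos : Int) (m : Nat) : List Int → (Int × Int) → List Int :=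
  fun acc p =>
    let j := pos + p.1
    if 0 ≤ j ∧ j < (m : Int) then PySem.List.pySetD acc j p.2 else acc

theorem pvT_length_one (pos : Int) (m : Nat) (acc : List Int) (p : Int × Int) :
    (pvT pos m acc p).length = acc.length := by
  simp only [pvT]
  split_ifs <;> simp [PySem.List.length_pySetD]

theorem pvT_get_ne (pos : Int) (m : Nat) (acc : List Int) (p : Int × Int) (k : Nat)
    (h : pos + p.1 ≠ (k : Int)) : (pvT pos m acc p)[k]? = acc[k]? := by
  simp only [pvT]
  split_ifs with hg
  · rw [PySem.List.pySetD_of_nonneg _ _ hg.1]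
    simp only [List.getElem?_set]
    rw [if_neg (by omega)]
  · rfl

theorem pvT_get_eq (pos : Int) (m : Nat) (acc : List Int) (p : Int × Int) (k : Nat)
    (hk : pos + p.1 = (k : Int)) (hkm : k < m) (hacc : acc.length = m) :
    (pvT pos m acc p)[k]? = some p.2 := by
  simp only [pvT]
  rw [if_pos (by omega)]
  rw [PySem.List.pySetD_of_nonneg _ _ (by omega)]
  simp only [List.getElem?_set]
  rw [if_pos (by omega), if_pos (by omega)]

theorem pvB_core (pos : Int) (m : Nat) (h0 : 0 ≤ pos) (_hm : pos < (m : Int)) :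
    List.foldl (pvT pos m) (PySem.List.pySetD (List.replicate m (1 : Int)) pos 0)
      [(-3, 3), (-2, 3), (-1, 6), (1, 6), (2, 3), (3, 3)] =
    (List.range m).map (fun k : Nat => pvStepVal pos (k : Int)) := by
  have hinitlen : (PySem.List.pySetD (List.replicate m (1 : Int)) pos 0).length = m := by
    simp [PySem.List.length_pySetD]
  have hinit : ∀ k : Nat, k < m →
      (PySem.List.pySetD (List.replicate m (1 : Int)) pos 0)[k]? =
      some (if (k : Int) = pos then 0 else 1) := by
    intro k hk
    rw [PySem.List.pySetD_of_nonneg _ _ h0]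
    simp only [List.getElem?_set, List.length_replicate, List.getElem?_replicate]
    split_ifs <;> first | rfl | omega
  apply List.ext_getElem?
  intro k
  simp only [List.foldl_cons, List.foldl_nil]
  by_cases hk : k < m
  · rw [List.getElem?_map, List.getElem?_range hk, Option.map_some]
    have hlen2 : ∀ (ps : List (Int × Int)) (acc : List Int),
        (ps.foldl (pvT pos m) acc).length = acc.length := by
      intro ps
      induction ps with
      | nil => intro acc; rfl
      | cons p rest ih => intro acc; rw [List.foldl_cons, ih, pvT_length_one]
    by_cases e0 : (k : Int) = pos
    · rw [pvT_get_ne _ _ _ _ _ (by omega), pvT_get_ne _ _ _ _ _ (by omega),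
        pvT_get_ne _ _ _ _ _ (by omega), pvT_get_ne _ _ _ _ _ (by omega),
        pvT_get_ne _ _ _ _ _ (by omega), pvT_get_ne _ _ _ _ _ (by omega),
        hinit k hk, if_pos e0]
      have : (pos - (k : Int)).natAbs = 0 := by omega
      simp [pvStepVal, this]
    · by_cases e1 : (k : Int) = pos - 3
      · rw [pvT_get_ne _ _ _ _ _ (by omega), pvT_get_ne _ _ _ _ _ (by omega),
          pvT_get_ne _ _ _ _ _ (by omega), pvT_get_ne _ _ _ _ _ (by omega),
          pvT_get_ne _ _ _ _ _ (by omega),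
          pvT_get_eq _ _ _ _ _ (by omega) hk hinitlen]
        have : (pos - (k : Int)).natAbs = 3 := by omega
        simp [pvStepVal, this]
      · by_cases e2 : (k : Int) = pos - 2
        · rw [pvT_get_ne _ _ _ _ _ (by omega), pvT_get_ne _ _ _ _ _ (by omega),
            pvT_get_ne _ _ _ _ _ (by omega), pvT_get_ne _ _ _ _ _ (by omega),
            pvT_get_eq _ _ _ _ _ (by omega) hk (by simp only [pvT_length_one]; exact hinitlen)]
          have : (pos - (k : Int)).natAbs = 2 := by omega
          simp [pvStepVal, this]
        · by_cases e3 : (k : Int) = pos - 1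
          · rw [pvT_get_ne _ _ _ _ _ (by omega), pvT_get_ne _ _ _ _ _ (by omega),
              pvT_get_ne _ _ _ _ _ (by omega),
              pvT_get_eq _ _ _ _ _ (by omega) hk
                (by simp only [pvT_length_one]; exact hinitlen)]
            have : (pos - (k : Int)).natAbs = 1 := by omega
            simp [pvStepVal, this]
          · by_cases e4 : (k : Int) = pos + 1
            · rw [pvT_get_ne _ _ _ _ _ (by omega), pvT_get_ne _ _ _ _ _ (by omega),
                pvT_get_eq _ _ _ _ _ (by omega) hk
                  (by simp only [pvT_length_one]; exact hinitlen)]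
              have : (pos - (k : Int)).natAbs = 1 := by omega
              simp [pvStepVal, this]
            · by_cases e5 : (k : Int) = pos + 2
              · rw [pvT_get_ne _ _ _ _ _ (by omega),
                  pvT_get_eq _ _ _ _ _ (by omega) hk
                    (by simp only [pvT_length_one]; exact hinitlen)]
                have : (pos - (k : Int)).natAbs = 2 := by omega
                simp [pvStepVal, this]
              · by_cases e6 : (k : Int) = pos + 3
                · rw [pvT_get_eq _ _ _ _ _ (by omega) hk
                    (by simp only [pvT_length_one]; exact hinitlen)]
                  have : (pos - (k : Int)).natAbs = 3 := by omega
                  simp [pvStepVal, this]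
                · rw [pvT_get_ne _ _ _ _ _ (by omega), pvT_get_ne _ _ _ _ _ (by omega),
                    pvT_get_ne _ _ _ _ _ (by omega), pvT_get_ne _ _ _ _ _ (by omega),
                    pvT_get_ne _ _ _ _ _ (by omega), pvT_get_ne _ _ _ _ _ (by omega),
                    hinit k hk, if_neg (by omega)]
                  have h4 : 4 ≤ (pos - (k : Int)).natAbs := by omega
                  simp only [pvStepVal]
                  rw [if_neg (by omega), if_neg (by omega), if_neg (by omega)]
  · rw [List.getElem?_eq_none, List.getElem?_eq_none]
    · simp only [List.length_map, List.length_range]; omega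
    · simp only [pvT_length_one, hinitlen]
      omega

theorem pvB_map (sentence : List String) (pos : Int) (hp : pvFindAmbB sentence 0 = pos)
    (h0 : 0 ≤ pos) (hm : pos < (sentence.length : Int)) :
    get_stepped_weights_alt sentence = (List.range sentence.length).map (fun k : Nat => pvStepVal pos (k : Int)) := by
  have hne : pos ≠ -1 := by omega
  simp only [get_stepped_weights_alt, hp, if_neg hne]
  exact pvB_core pos sentence.length h0 hm

-- ===== VERDICT (by name: the statement is the Claim_ definition above) =====
theorem get_stepped_weights_spec : Claim_equal_get_stepped_weights := by
  intro sentence _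
  unfold Spec_get_stepped_weights
  by_cases h : pvFindAmbB sentence 0 = -1
  · unfold get_stepped_weights_alt
    rw [h, if_pos rfl]
    unfold get_stepped_weights get_index_of_ambigious_word
    rw [pvAmb_eq, h, if_pos rfl]
    rfl
  · have hA : get_index_of_ambigious_word sentence = pvFindAmbB sentence 0 :=
      pvAmb_eq sentence 0
    rcases pvAmb_range sentence 0 with hc | ⟨h1, h2⟩
    · exact absurd ((pvAmb_eq sentence 0) ▸ hc) h
    · rw [pvAmb_eq] at h1 h2
      rw [pvA_map sentence (pvFindAmbB sentence 0) hA h,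
        pvB_map sentence (pvFindAmbB sentence 0) rfl h1 (by omega)]
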